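-- pv_equiv track=rewrite | github.com/swarm-ai-safety/swarm | examples/run_labos_toolmaker_spike.py | _counts_from_scenario
-- ===== SOURCE A (Python) =====
-- from typing import Dict, List, Tuple
--
-- def _counts_from_scenario(scenario: dict) -> Tuple[int, int, int]:
--     """Extract (n_honest, n_opportunistic, n_careless) from the YAML."""
--     n_h, n_o, n_c = 0, 0, 0
--     for row in scenario.get("agents", []):
--         t = row.get("type", "")
--         c = int(row.get("count", 0))
--         if t == "honest":
--             n_h += c
--         elif t == "opportunistic":
--             n_o += c
--         else:
--             # deceptive is the roster-slot used for the careless archetype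
--             # (the scenario YAML is constrained to registered agent types).
--             n_c += c
--     return n_h, n_o, n_c
-- ===== SOURCE B (Python) =====
-- def _counts_from_scenario(scenario):
--     """Extract (n_honest, n_opportunistic, n_careless) from the YAML."""
--     agents = scenario.get("agents", [])
--     n_h = sum(int(r.get("count", 0)) for r in agents if r.get("type", "") == "honest")
--     n_o = sum(int(r.get("count", 0)) for r in agents if r.get("type", "") == "opportunistic")
--     n_c = sum(int(r.get("count", 0)) for r in agents
--               if r.get("type", "") not in ("honest", "opportunistic"))
--     return n_h, n_o, n_c
-- ===== Notes on version B (the rewrite author's own statement) =====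
-- stated objective: idiomatic
-- what changed: Replaces the single three-accumulator loop with three independent filtered sum comprehensions over the agents list (one per bucket, the else-branch encoded as 'type not in (honest, opportunistic)').
import Mathlib
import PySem

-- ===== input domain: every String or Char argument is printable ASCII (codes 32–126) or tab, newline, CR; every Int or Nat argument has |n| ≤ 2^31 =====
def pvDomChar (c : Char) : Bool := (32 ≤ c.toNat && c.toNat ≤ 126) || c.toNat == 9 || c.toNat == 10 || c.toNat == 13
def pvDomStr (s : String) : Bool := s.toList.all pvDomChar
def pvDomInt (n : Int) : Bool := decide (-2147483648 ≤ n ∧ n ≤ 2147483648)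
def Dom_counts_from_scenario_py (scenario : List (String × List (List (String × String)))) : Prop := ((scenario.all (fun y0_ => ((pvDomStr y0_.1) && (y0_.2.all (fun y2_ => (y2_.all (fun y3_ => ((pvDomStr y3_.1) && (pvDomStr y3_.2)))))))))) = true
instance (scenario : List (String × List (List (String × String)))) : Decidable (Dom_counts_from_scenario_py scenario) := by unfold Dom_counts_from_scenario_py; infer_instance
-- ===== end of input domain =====

-- B replaces A's single three-accumulator loop by three independent filtered sums (idiomatic, same cost).


-- ===== PORT A =====
def counts_from_scenario_py (scenario : List (String × List (List (String × String)))) : Int × Int × Int :=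
  let agents := (List.lookup "agents" scenario).getD []
  agents.foldl (fun acc row =>
    let t := (List.lookup "type" row).getD ""
    -- c = int(row.get("count", 0)): missing key -> 0; present -> int(s) (Pre_ guarantees ofStr? succeeds)
    let c := match List.lookup "count" row with
             | none => 0
             | some s => (PySem.Int.ofStr? s).getD 0
    if t = "honest" then (acc.1 + c, acc.2.1, acc.2.2)
    else if t = "opportunistic" then (acc.1, acc.2.1 + c, acc.2.2)
    else (acc.1, acc.2.1, acc.2.2 + c)) (0, 0, 0)

-- ===== PORT B =====
def pvBType (row : List (String × String)) : String :=
  (List.lookup "type" row).getD ""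

def pvBCount (row : List (String × String)) : Int :=
  match List.lookup "count" row with
  | none => 0
  | some s => (PySem.Int.ofStr? s).getD 0

def counts_from_scenario_py_alt (scenario : List (String × List (List (String × String)))) : Int × Int × Int :=
  let agents := (List.lookup "agents" scenario).getD []
  (((agents.filter (fun r => pvBType r == "honest")).map pvBCount).sum,
   ((agents.filter (fun r => pvBType r == "opportunistic")).map pvBCount).sum,
   ((agents.filter (fun r => pvBType r != "honest" && pvBType r != "opportunistic")).map pvBCount).sum)

-- ===== PRECONDITION & SPEC =====
-- Pre_: every present "count" value parses as a Python int; elsewhere int(...) raises ValueError in A (and B).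
def Pre_counts_from_scenario_py (scenario : List (String × List (List (String × String)))) : Prop :=
  ∀ row ∈ (List.lookup "agents" scenario).getD [],
    ∀ s, List.lookup "count" row = some s → (PySem.Int.ofStr? s).isSome
instance (scenario : List (String × List (List (String × String)))) : Decidable (Pre_counts_from_scenario_py scenario) := by unfold Pre_counts_from_scenario_py; infer_instance

def pvWitness_counts_from_scenario_py : (List (String × List (List (String × String)))) :=
  [("agents", [[("type", "honest"), ("count", "3")], [("type", "deceptive"), ("count", "2")]])]

def Spec_counts_from_scenario_py (scenario : List (String × List (List (String × String)))) (out : Int × Int × Int) : Prop := out = counts_from_scenario_py_alt scenario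
instance (scenario : List (String × List (List (String × String)))) (out : Int × Int × Int) : Decidable (Spec_counts_from_scenario_py scenario out) := by unfold Spec_counts_from_scenario_py; infer_instance

-- ===== CLAIM (what is proved, stated in full; the proofs are below) =====
def Claim_equal_counts_from_scenario_py : Prop := ∀ (scenario : List (String × List (List (String × String)))), Dom_counts_from_scenario_py scenario → Pre_counts_from_scenario_py scenario → Spec_counts_from_scenario_py scenario (counts_from_scenario_py scenario)

-- ===== LEMMAS AND PROOFS =====
-- A's fold over a row list adds B's three filtered sums to the accumulator.
theorem pv_fold_eq (l : List (List (String × String))) :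
    ∀ a b c : Int,
      l.foldl (fun acc row =>
        let t := (List.lookup "type" row).getD ""
        let c' := match List.lookup "count" row with
                  | none => 0
                  | some s => (PySem.Int.ofStr? s).getD 0
        if t = "honest" then (acc.1 + c', acc.2.1, acc.2.2)
        else if t = "opportunistic" then (acc.1, acc.2.1 + c', acc.2.2)
        else (acc.1, acc.2.1, acc.2.2 + c')) (a, b, c)
      = (a + ((l.filter (fun r => pvBType r == "honest")).map pvBCount).sum,
         b + ((l.filter (fun r => pvBType r == "opportunistic")).map pvBCount).sum,
         c + ((l.filter (fun r => pvBType r != "honest" && pvBType r != "opportunistic")).map pvBCount).sum) := by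
  induction l with
  | nil => intro a b c; simp
  | cons r rs ih =>
    intro a b c
    by_cases h1 : (List.lookup "type" r).getD "" = "honest"
    · simp only [List.foldl_cons, ih, List.filter_cons]
      simp [pvBType, h1, pvBCount, add_assoc]
    · by_cases h2 : (List.lookup "type" r).getD "" = "opportunistic"
      · simp only [List.foldl_cons, ih, List.filter_cons]
        simp [pvBType, h2, pvBCount, add_assoc]
      · simp only [List.foldl_cons, ih, List.filter_cons]
        simp [pvBType, h1, h2, pvBCount, add_assoc]

-- ===== VERDICT (by name: the statement is the Claim_ definition above) =====
theorem counts_from_scenario_py_spec : Claim_equal_counts_from_scenario_py := by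
  intro scenario _ _
  unfold Spec_counts_from_scenario_py counts_from_scenario_py counts_from_scenario_py_alt
  simp [pv_fold_eq]
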